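-- pv_equiv track=rewrite | github.com/ghost-in-moss/GhostOS | libs/moss/src/ghostos_moss/utils.py | strip_source_indent
-- ===== SOURCE A (Python) =====
-- from typing import Any, Callable, Optional, List, Iterable, get_origin, get_args, Type
--
-- def strip_source_indent(source_code: str, indent: Optional[int] = None) -> str:
--     """
--     一个简单的方法, 用来删除代码前面的 indent.
--     """
--     if indent is None:
--         indent = count_source_indent(source_code)
--     if indent == 0:
--         return source_code
--     indent_str = ' ' * indent
--     source_lines = source_code.split('\n')
--     result_lines = []
--     for line in source_lines:
--         if line.startswith(indent_str):
--             line = line[indent:]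
--         result_lines.append(line)
--     return '\n'.join(result_lines)
--
-- def count_source_indent(source_code: str) -> int:
--     """
--     一个简单的方法, 用来判断一段 python 函数代码的 indent.
--     """
--     source_lines = source_code.split('\n')
--     for line in source_lines:
--         right_stripped = line.rstrip()
--         if len(right_stripped) == 0:
--             continue
--         both_stripped = right_stripped.lstrip()
--         return len(right_stripped) - len(both_stripped)
--     return 0
-- ===== SOURCE B (Python) =====
-- import re
-- from typing import Optional
--
--
-- def count_source_indent(source_code: str) -> int:
--     source_lines = source_code.split('\n')
--     for line in source_lines:
--         right_stripped = line.rstrip()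
--         if len(right_stripped) == 0:
--             continue
--         both_stripped = right_stripped.lstrip()
--         return len(right_stripped) - len(both_stripped)
--     return 0
--
--
-- def strip_source_indent(source_code: str, indent: Optional[int] = None) -> str:
--     if indent is None:
--         indent = count_source_indent(source_code)
--     if indent <= 0:
--         return source_code
--     return re.sub(r'(?m)^ {%d}' % indent, '', source_code)
-- ===== Notes on version B (the rewrite author's own statement) =====
-- stated objective: idiomatic
-- what changed: The split('\n')/per-line-startswith-loop/join pipeline is replaced by a single multiline regex substitution re.sub(r'(?m)^ {N}', '', source) that deletes exactly N leading spaces at each line start in one pass over the string.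
-- intended difference: For a negative explicit indent with some line longer than |indent|, A's slice line[indent:] wraps around and truncates every such line to its last |indent| characters, while B returns the source unchanged; there is no indentation to strip for a non-positive indent, so leaving the text intact is the intended value. — e.g. on strip_source_indent("abc", some (-1)): A returns "c", B returns "abc"
import Mathlib
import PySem

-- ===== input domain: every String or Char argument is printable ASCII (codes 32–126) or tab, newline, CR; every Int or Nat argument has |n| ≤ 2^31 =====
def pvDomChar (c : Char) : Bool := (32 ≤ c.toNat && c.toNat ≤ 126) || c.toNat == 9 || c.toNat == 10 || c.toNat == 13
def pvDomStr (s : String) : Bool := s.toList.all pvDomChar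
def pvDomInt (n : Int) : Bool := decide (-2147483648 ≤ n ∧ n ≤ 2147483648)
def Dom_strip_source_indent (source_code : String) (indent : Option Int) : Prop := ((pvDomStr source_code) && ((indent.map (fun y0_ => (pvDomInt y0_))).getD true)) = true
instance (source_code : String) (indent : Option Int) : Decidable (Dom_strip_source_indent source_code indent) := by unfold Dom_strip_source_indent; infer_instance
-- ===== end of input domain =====

-- B replaces A's split('\n') / per-line-loop / join pipeline by a single multiline-regex
-- substitution (one left-to-right pass over the string); same cost, more idiomatic Python.

-- ===== PORT A =====
-- module helper count_source_indent (shared by both Pythons): the for-loop over the lines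
def count_source_indent_loop : List (List Char) → Int
  | [] => 0
  | line :: rest =>
    let right_stripped := PySem.Chars.rstrip line
    if PySem.Chars.len right_stripped = 0 then count_source_indent_loop rest
    else
      let both_stripped := PySem.Chars.lstrip right_stripped
      (PySem.Chars.len right_stripped : Int) - (PySem.Chars.len both_stripped : Int)

def count_source_indent_port (src : List Char) : Int :=
  count_source_indent_loop (PySem.Chars.splitOn src ['\n'])

def strip_source_indent (source_code : String) (indent : Option Int) : String :=
  let src := source_code.toList
  let ind : Int := match indent with
    | none => count_source_indent_port src
    | some i => i
  if ind = 0 then source_code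
  else
    let indent_str : List Char := List.replicate ind.toNat ' '   -- ' ' * indent ('' for indent < 0)
    let source_lines := PySem.Chars.splitOn src ['\n']
    let result_lines := source_lines.foldl
      (fun acc line =>
        acc ++ [if PySem.Chars.startswith line indent_str then PySem.List.slice line (some ind) none else line]) []
    String.ofList (PySem.Chars.join ['\n'] result_lines)

-- ===== PORT B =====
-- hand port of the regex test "does ' {n}' match at this position": n ≤ number of leading spaces
def reMatchIndent (n : Nat) (cs : List Char) : Bool := n ≤ (cs.takeWhile (· == ' ')).length

-- hand port of re.sub(r'(?m)^ {n}', '', s): one left-to-right scan; at each line start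
-- (string start or right after '\n') a run of n spaces is deleted, everything else is copied.
-- Exact for this pattern: matches are non-overlapping and the replacement is empty.
def reSubIndent (n : Nat) (atStart : Bool) (cs : List Char) : List Char :=
  match cs with
  | [] => []
  | c :: rest =>
    if h : atStart ∧ reMatchIndent n (c :: rest) then
      reSubIndent n false ((c :: rest).drop n)
    else
      c :: reSubIndent n (c == '\n') rest
termination_by cs.length * 2 + atStart.toNat
decreasing_by
  · have h1 : atStart = true := h.1
    subst h1
    simp only [Bool.toNat_false, Bool.toNat_true, List.length_drop, List.length_cons]
    omega
  · have hb := Bool.toNat_le (c == '\n')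
    simp only [List.length_cons]
    omega

def strip_source_indent_alt (source_code : String) (indent : Option Int) : String :=
  let ind : Int := match indent with
    | none => count_source_indent_port source_code.toList
    | some i => i
  if ind ≤ 0 then source_code
  else String.ofList (reSubIndent ind.toNat true source_code.toList)

-- ===== PRECONDITION & SPEC =====
-- For a negative explicit indent with some line longer than |indent|, A's slice line[indent:]
-- wraps around and truncates every such line to its last |indent| characters, while B returns
-- the source unchanged; nothing should be stripped for a non-positive indent, so B's value is intended.
def D_strip_source_indent (source_code : String) (indent : Option Int) : Prop :=
  indent ≠ none ∧ indent.getD 0 < 0 ∧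
    ∃ l ∈ PySem.Chars.splitOn source_code.toList ['\n'], (-(indent.getD 0)) < (l.length : Int)
instance (source_code : String) (indent : Option Int) : Decidable (D_strip_source_indent source_code indent) := by
  unfold D_strip_source_indent; infer_instance

def Spec_strip_source_indent (source_code : String) (indent : Option Int) (out : String) : Prop := ¬ D_strip_source_indent source_code indent → out = strip_source_indent_alt source_code indent
instance (source_code : String) (indent : Option Int) (out : String) : Decidable (Spec_strip_source_indent source_code indent out) := by unfold Spec_strip_source_indent; infer_instance

def pvDiffWitness_strip_source_indent : String × Option Int := ("abc", some (-1))
def pvDiffWitnessOut_strip_source_indent : String × String := ("c", "abc")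

-- ===== CLAIM (what is proved, stated in full; the proofs are below) =====
def Claim_unchanged_strip_source_indent : Prop := ∀ (source_code : String) (indent : Option Int), Dom_strip_source_indent source_code indent → Spec_strip_source_indent source_code indent (strip_source_indent source_code indent)
def Claim_changed_strip_source_indent : Prop := Dom_strip_source_indent (pvDiffWitness_strip_source_indent.1) (pvDiffWitness_strip_source_indent.2) ∧ D_strip_source_indent (pvDiffWitness_strip_source_indent.1) (pvDiffWitness_strip_source_indent.2) ∧ strip_source_indent (pvDiffWitness_strip_source_indent.1) (pvDiffWitness_strip_source_indent.2) = pvDiffWitnessOut_strip_source_indent.1 ∧ strip_source_indent_alt (pvDiffWitness_strip_source_indent.1) (pvDiffWitness_strip_source_indent.2) = pvDiffWitnessOut_strip_source_indent.2 ∧ pvDiffWitnessOut_strip_source_indent.1 ≠ pvDiffWitnessOut_strip_source_indent.2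

def Claim_exact_strip_source_indent : Prop := ∀ (source_code : String) (indent : Option Int), Dom_strip_source_indent source_code indent → D_strip_source_indent source_code indent → strip_source_indent source_code indent ≠ strip_source_indent_alt source_code indent

-- ===== LEMMAS AND PROOFS =====

-- Python's s.split('\n'), structurally
def splitNl : List Char → List (List Char)
  | [] => [[]]
  | c :: rest => if c = '\n' then [] :: splitNl rest else (splitNl rest).modifyHead (c :: ·)

theorem splitNl_ne_nil (cs : List Char) : splitNl cs ≠ [] := by
  induction cs with
  | nil => simp [splitNl]
  | cons c r ih =>
    simp only [splitNl]
    split_ifs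
    · simp
    · rcases hr : splitNl r with _ | ⟨a, t⟩
      · exact absurd hr ih
      · simp

theorem splitOn_go_spec (fuel : Nat) : ∀ (l cur : List Char) (acc : List (List Char)),
    l.length ≤ fuel →
    PySem.Chars.splitOn.go ['\n'] fuel l cur acc
      = acc.reverse ++ (splitNl l).modifyHead (cur.reverse ++ ·) := by
  induction fuel with
  | zero =>
    intro l cur acc hl
    have : l = [] := List.length_eq_zero_iff.mp (Nat.le_zero.mp hl)
    subst this
    simp [PySem.Chars.splitOn.go, splitNl]
  | succ fuel ih =>
    intro l cur acc hl
    match l with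
    | [] => simp [PySem.Chars.splitOn.go, splitNl]
    | c :: rest =>
      by_cases hc : c = '\n'
      · subst hc
        have : List.isPrefixOf ['\n'] ('\n' :: rest) = true := by simp [List.isPrefixOf]
        simp only [PySem.Chars.splitOn.go, this, if_pos]
        have hdrop : List.drop ['\n'].length ('\n' :: rest) = rest := rfl
        rw [hdrop, ih rest [] (cur.reverse :: acc)
          (by simp only [List.length_cons] at hl; omega)]
        rcases hr : splitNl rest with _ | ⟨a, t⟩
        · exact absurd hr (splitNl_ne_nil rest)
        · simp [splitNl, hr]
      · have : List.isPrefixOf ['\n'] (c :: rest) = false := by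
          simp [List.isPrefixOf]
          exact fun h => absurd h.symm hc
        simp only [PySem.Chars.splitOn.go, this, Bool.false_eq_true, if_false]
        rw [ih rest (c :: cur) acc (by simp only [List.length_cons] at hl; omega)]
        rcases hr : splitNl rest with _ | ⟨a, t⟩
        · exact absurd hr (splitNl_ne_nil rest)
        · simp [splitNl, hr, hc]

theorem splitOn_eq_splitNl (cs : List Char) : PySem.Chars.splitOn cs ['\n'] = splitNl cs := by
  unfold PySem.Chars.splitOn
  rw [splitOn_go_spec (cs.length + 1) cs [] [] (by omega)]
  rcases hr : splitNl cs with _ | ⟨a, t⟩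
  · exact absurd hr (splitNl_ne_nil cs)
  · simp

theorem splitNl_append {l : List Char} (rest : List Char) (hl : '\n' ∉ l) :
    splitNl (l ++ '\n' :: rest) = l :: splitNl rest := by
  induction l with
  | nil => simp [splitNl]
  | cons c l' ih =>
    have hc : c ≠ '\n' := fun h => hl (by simp [h])
    have h' : '\n' ∉ l' := fun h => hl (by simp [h])
    simp only [List.cons_append, splitNl, hc, if_false, ih h']
    simp

theorem splitNl_of_not_mem {l : List Char} (hl : '\n' ∉ l) : splitNl l = [l] := by
  induction l with
  | nil => simp [splitNl]
  | cons c l' ih =>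
    have hc : c ≠ '\n' := fun h => hl (by simp [h])
    have h' : '\n' ∉ l' := fun h => hl (by simp [h])
    simp [splitNl, hc, ih h']

theorem join_splitNl (cs : List Char) : PySem.Chars.join ['\n'] (splitNl cs) = cs := by
  induction cs with
  | nil => simp [splitNl, PySem.Chars.join_singleton]
  | cons c rest ih =>
    by_cases hc : c = '\n'
    · subst hc
      rcases hr : splitNl rest with _ | ⟨a, t⟩
      · exact absurd hr (splitNl_ne_nil rest)
      · have hs : splitNl ('\n' :: rest) = [] :: splitNl rest := by simp [splitNl]
        rw [hr] at ih
        rw [hs, hr, PySem.Chars.join_cons_cons, ih]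
        simp
    · rcases hr : splitNl rest with _ | ⟨a, t⟩
      · exact absurd hr (splitNl_ne_nil rest)
      · rw [hr] at ih
        rcases t with _ | ⟨b, t'⟩
        · simp [splitNl, hc, hr, PySem.Chars.join_singleton] at ih ⊢
          simp [ih]
        · simp only [splitNl, hc, if_false, hr, List.modifyHead_cons, PySem.Chars.join_cons_cons] at ih ⊢
          simp only [List.cons_append]
          rw [← ih]

theorem takeWhile_space_append (l rest : List Char) :
    (l ++ '\n' :: rest).takeWhile (· == ' ') = l.takeWhile (· == ' ') := by
  induction l with
  | nil => simp
  | cons c l' ih =>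
    by_cases hc : c = ' '
    · simp [hc, ih]
    · simp [hc]

theorem replicate_isPrefixOf_iff (n : Nat) (cs : List Char) :
    (List.replicate n ' ').isPrefixOf cs = reMatchIndent n cs := by
  induction n generalizing cs with
  | zero => simp [reMatchIndent]
  | succ n ih =>
    match cs with
    | [] => simp [List.replicate_succ, reMatchIndent]
    | c :: cs' =>
      by_cases hc : c = ' '
      · subst hc
        simp only [List.replicate_succ, List.isPrefixOf, List.takeWhile_cons, reMatchIndent,
          beq_self_eq_true, Bool.true_and, if_pos, List.length_cons]
        rw [ih cs']
        simp [reMatchIndent]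
      · have h1 : (' ' == c) = false := by simp [Ne.symm hc]
        have h2 : (c == ' ') = false := by simp [hc]
        simp [List.replicate_succ, List.isPrefixOf, reMatchIndent, h1, h2]

theorem reSub_false_no_nl {l : List Char} (n : Nat) (hl : '\n' ∉ l) :
    reSubIndent n false l = l := by
  induction l with
  | nil => simp [reSubIndent]
  | cons c l' ih =>
    have hc : (c == '\n') = false := by simp; exact fun h => hl (by simp [h])
    have h' : '\n' ∉ l' := fun h => hl (by simp [h])
    rw [reSubIndent]
    simp [hc, ih h']

theorem reSub_false_append {l : List Char} (n : Nat) (rest : List Char) (hl : '\n' ∉ l) :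
    reSubIndent n false (l ++ '\n' :: rest) = l ++ '\n' :: reSubIndent n true rest := by
  induction l with
  | nil =>
    rw [List.nil_append, reSubIndent]
    simp
  | cons c l' ih =>
    have hc : (c == '\n') = false := by simp; exact fun h => hl (by simp [h])
    have h' : '\n' ∉ l' := fun h => hl (by simp [h])
    rw [List.cons_append, reSubIndent]
    simp [hc, ih h']

theorem reSub_true_eq (n : Nat) (hn : 1 ≤ n) (cs : List Char) :
    reSubIndent n true cs
      = reSubIndent n false (if reMatchIndent n cs then cs.drop n else cs) := by
  match cs with
  | [] =>
    have : reMatchIndent n [] = false := by simp [reMatchIndent]; omega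
    simp [this, reSubIndent]
  | c :: rest =>
    by_cases hm : reMatchIndent n (c :: rest)
    · have hL : reSubIndent n true (c :: rest) = reSubIndent n false ((c :: rest).drop n) := by
        rw [reSubIndent]; simp [hm]
      rw [hL, if_pos hm]
    · have hL : reSubIndent n true (c :: rest) = c :: reSubIndent n (c == '\n') rest := by
        rw [reSubIndent]; simp [hm]
      have hR : reSubIndent n false (c :: rest) = c :: reSubIndent n (c == '\n') rest := by
        rw [reSubIndent]; simp
      rw [if_neg hm, hL, hR]

theorem main_aux (n : Nat) (hn : 1 ≤ n) : ∀ (N : Nat) (cs : List Char), cs.length ≤ N →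
    PySem.Chars.join ['\n']
        ((splitNl cs).map (fun l => if reMatchIndent n l then l.drop n else l))
      = reSubIndent n true cs := by
  intro N
  induction N with
  | zero =>
    intro cs hcs
    have : cs = [] := List.length_eq_zero_iff.mp (Nat.le_zero.mp hcs)
    subst this
    have : reMatchIndent n [] = false := by simp [reMatchIndent]; omega
    simp [splitNl, this, reSubIndent, PySem.Chars.join_singleton]
  | succ N ihN =>
    intro cs hcs
    by_cases hmem : '\n' ∈ cs
    · -- split at the first newline
      set l := cs.takeWhile (· ≠ '\n') with hldef
      have hdw : cs.dropWhile (· ≠ '\n') ≠ [] := by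
        intro h
        have := List.dropWhile_eq_nil_iff.mp h '\n' hmem
        simp at this
      rcases hd : cs.dropWhile (· ≠ '\n') with _ | ⟨d, ds⟩
      · exact absurd hd hdw
      · have hdn : d = '\n' := by
          have h5 := List.head_dropWhile_not (fun c => decide (c ≠ '\n')) hdw
          simp only [hd, List.head_cons] at h5
          simpa using h5
        subst hdn
        have hsplit : cs = l ++ '\n' :: ds := by
          conv_lhs => rw [← List.takeWhile_append_dropWhile (p := fun c => decide (c ≠ '\n')) (l := cs)]
          rw [hd]
        have hlnn : '\n' ∉ l := by
          intro h
          have := List.mem_takeWhile_imp h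
          simp at this
        have hlen : ds.length ≤ N := by
          have : cs.length = l.length + 1 + ds.length := by rw [hsplit]; simp; omega
          omega
        have hmatch : reMatchIndent n cs = reMatchIndent n l := by
          unfold reMatchIndent
          rw [hsplit, takeWhile_space_append]
        rw [hsplit, splitNl_append ds hlnn]
        rw [List.map_cons]
        rcases hr : (splitNl ds).map (fun l => if reMatchIndent n l then l.drop n else l) with _ | ⟨b, t⟩
        · exact absurd (List.map_eq_nil_iff.mp hr) (splitNl_ne_nil ds)
        · rw [PySem.Chars.join_cons_cons]
          rw [← hr, ihN ds hlen]
          rw [← hsplit, reSub_true_eq n hn cs, hmatch]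
          by_cases hM : reMatchIndent n l
          · have hnl : n ≤ l.length := by
              have h2 : n ≤ (l.takeWhile (· == ' ')).length := by
                have h4 := hM; unfold reMatchIndent at h4; simpa using h4
              have h3 := (List.takeWhile_sublist (l := l) (· == ' ')).length_le
              omega
            have hlnn' : '\n' ∉ l.drop n := fun h => hlnn (List.drop_subset n l h)
            simp only [if_pos hM]
            rw [hsplit, List.drop_append_of_le_length hnl, reSub_false_append n ds hlnn']
            simp
          · simp only [if_neg hM]
            rw [hsplit, reSub_false_append n ds hlnn]
            simp
    · rw [splitNl_of_not_mem hmem]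
      rw [reSub_true_eq n hn cs]
      by_cases hM : reMatchIndent n cs
      · have hnn : '\n' ∉ cs.drop n := fun h => hmem (List.drop_subset n cs h)
        simp only [if_pos hM, List.map_cons, List.map_nil, PySem.Chars.join_singleton]
        rw [reSub_false_no_nl n hnn]
      · simp only [if_neg hM, List.map_cons, List.map_nil, PySem.Chars.join_singleton]
        rw [reSub_false_no_nl n hmem]

theorem A_eq_B_pos (src : List Char) (k : Int) (hk : 0 < k) :
    PySem.Chars.join ['\n']
      ((PySem.Chars.splitOn src ['\n']).foldl
        (fun acc line =>
          acc ++ [if PySem.Chars.startswith line (List.replicate k.toNat ' ')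
                  then PySem.List.slice line (some k) none else line]) [])
      = reSubIndent k.toNat true src := by
  rw [PySem.List.foldl_append_singleton_eq_map, List.nil_append, splitOn_eq_splitNl]
  have hcast : ((k.toNat : Nat) : Int) = k := Int.toNat_of_nonneg hk.le
  have hline : ∀ l : List Char,
      (if PySem.Chars.startswith l (List.replicate k.toNat ' ')
       then PySem.List.slice l (some k) none else l)
        = (if reMatchIndent k.toNat l then l.drop k.toNat else l) := by
    intro l
    rw [show PySem.Chars.startswith l (List.replicate k.toNat ' ')
          = (List.replicate k.toNat ' ').isPrefixOf l from rfl]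
    rw [replicate_isPrefixOf_iff]
    by_cases hm : reMatchIndent k.toNat l
    · rw [if_pos hm, if_pos hm]
      conv_lhs => rw [← hcast]
      rw [PySem.List.slice_from_natCast]
    · rw [if_neg hm, if_neg hm]
  simp only [hline]
  exact main_aux k.toNat (by omega) src.length src le_rfl

theorem count_loop_nonneg (lines : List (List Char)) : 0 ≤ count_source_indent_loop lines := by
  induction lines with
  | nil => simp [count_source_indent_loop]
  | cons line rest ih =>
    rw [count_source_indent_loop]
    split_ifs with h
    · exact ih
    · have := (List.dropWhile_sublist (l := (PySem.Chars.rstrip line))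
        PySem.Chars.isspace).length_le
      simp only [PySem.Chars.len_eq, PySem.Chars.lstrip]
      omega

theorem A_eq_B_of_pos (s : String) (indent : Option Int) (k : Int)
    (hind : (match indent with
      | none => count_source_indent_port s.toList
      | some i => i) = k) (hk : 0 < k) :
    strip_source_indent s indent = strip_source_indent_alt s indent := by
  unfold strip_source_indent strip_source_indent_alt
  simp only [hind]
  rw [if_neg (by omega), if_neg (by omega)]
  exact congrArg String.ofList (A_eq_B_pos s.toList k hk)

theorem A_eq_B_of_zero (s : String) (indent : Option Int)
    (hind : (match indent with
      | none => count_source_indent_port s.toList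
      | some i => i) = 0) :
    strip_source_indent s indent = strip_source_indent_alt s indent := by
  unfold strip_source_indent strip_source_indent_alt
  simp only [hind]
  simp

theorem A_body_neg (src : List Char) (k : Int) (hk : k < 0)
    (hall : ∀ l ∈ PySem.Chars.splitOn src ['\n'], (l.length : Int) ≤ -k) :
    PySem.Chars.join ['\n']
      ((PySem.Chars.splitOn src ['\n']).foldl
        (fun acc line =>
          acc ++ [if PySem.Chars.startswith line (List.replicate k.toNat ' ')
                  then PySem.List.slice line (some k) none else line]) [])
      = src := by
  have htn : k.toNat = 0 := Int.toNat_of_nonpos hk.le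
  have hmap : ∀ l ∈ PySem.Chars.splitOn src ['\n'],
      (if PySem.Chars.startswith l (List.replicate k.toNat ' ')
       then PySem.List.slice l (some k) none else l) = l := by
    intro l hl
    have hsw : PySem.Chars.startswith l (List.replicate k.toNat ' ') = true := by
      rw [htn]
      simp [PySem.Chars.startswith]
    rw [if_pos hsw]
    have hknat : 0 < (-k).toNat := by omega
    have hk' : k = -(((-k).toNat : Nat) : Int) := by omega
    rw [hk', PySem.List.slice_from_neg_natCast l (-k).toNat hknat]
    have h0 : l.length - (-k).toNat = 0 := by
      have := hall l hl
      omega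
    rw [h0, List.drop_zero]
  rw [PySem.List.foldl_append_singleton_eq_map, List.nil_append,
    List.map_congr_left hmap, List.map_id', splitOn_eq_splitNl, join_splitNl]

theorem A_eq_B_of_neg (s : String) (indent : Option Int) (k : Int)
    (hind : (match indent with
      | none => count_source_indent_port s.toList
      | some i => i) = k) (hk : k < 0)
    (hall : ∀ l ∈ PySem.Chars.splitOn s.toList ['\n'], (l.length : Int) ≤ -k) :
    strip_source_indent s indent = strip_source_indent_alt s indent := by
  unfold strip_source_indent strip_source_indent_alt
  simp only [hind]
  rw [if_neg (by omega), if_pos (by omega)]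
  exact Eq.trans (congrArg String.ofList (A_body_neg s.toList k hk hall)) String.ofList_toList

-- ===== VERDICT (by name: the statement is the Claim_ definition above) =====
theorem strip_source_indent_spec : Claim_unchanged_strip_source_indent := by
  intro s indent _hDom hD
  show strip_source_indent s indent = strip_source_indent_alt s indent
  match indent with
  | none =>
    have hk : 0 ≤ count_source_indent_port s.toList := count_loop_nonneg _
    rcases eq_or_lt_of_le hk with h0 | hpos
    · exact A_eq_B_of_zero s none h0.symm
    · exact A_eq_B_of_pos s none _ rfl hpos
  | some i =>
    rcases lt_trichotomy i 0 with hi | hi | hi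
    · -- i < 0: ¬D says every line is at most |i| long
      have hall : ∀ l ∈ PySem.Chars.splitOn s.toList ['\n'], (l.length : Int) ≤ -i := by
        intro l hl
        by_contra hc
        apply hD
        refine ⟨by simp, ?_, l, hl, ?_⟩
        · simpa using hi
        · simp only [Option.getD_some]
          omega
      exact A_eq_B_of_neg s (some i) i rfl hi hall
    · exact A_eq_B_of_zero s (some i) (by simpa using hi)
    · exact A_eq_B_of_pos s (some i) i rfl hi

theorem strip_source_indent_changed : Claim_changed_strip_source_indent := by
  unfold Claim_changed_strip_source_indent; decide

theorem join_len_le (f : List Char → List Char) :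
    ∀ parts : List (List Char), (∀ l ∈ parts, (f l).length ≤ l.length) →
      (PySem.Chars.join ['\n'] (parts.map f)).length ≤ (PySem.Chars.join ['\n'] parts).length
  | [] => by intro _; simp
  | [a] => by
      intro h
      simp only [List.map_cons, List.map_nil, PySem.Chars.join_singleton]
      exact h a (by simp)
  | a :: b :: t => by
      intro h
      have h1 := h a (by simp)
      have h2 := join_len_le f (b :: t) (fun l hl => h l (by simp [hl]))
      simp only [List.map_cons] at h2 ⊢
      simp only [PySem.Chars.join_cons_cons, List.length_append]
      omega

theorem join_len_lt (f : List Char → List Char) :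
    ∀ parts : List (List Char), (∀ l ∈ parts, (f l).length ≤ l.length) →
      (∃ l ∈ parts, (f l).length < l.length) →
      (PySem.Chars.join ['\n'] (parts.map f)).length < (PySem.Chars.join ['\n'] parts).length
  | [] => by
      rintro _ ⟨l, hl, _⟩
      simp at hl
  | [a] => by
      rintro _ ⟨l, hl, hstrict⟩
      simp only [List.mem_singleton] at hl
      subst hl
      simpa [PySem.Chars.join_singleton] using hstrict
  | a :: b :: t => by
      rintro h ⟨l, hl, hstrict⟩
      simp only [List.map_cons, PySem.Chars.join_cons_cons, List.length_append]
      rcases List.mem_cons.mp hl with rfl | hl'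
      · have h2 := join_len_le f (b :: t) (fun l hl => h l (by simp [hl]))
        simp only [List.map_cons] at h2
        omega
      · have h1 := h a (by simp)
        have h2 := join_len_lt f (b :: t) (fun l hl => h l (by simp [hl])) ⟨l, hl', hstrict⟩
        simp only [List.map_cons] at h2
        omega

theorem strip_source_indent_tight : Claim_exact_strip_source_indent := by
  intro s indent _hDom hd
  obtain ⟨hne, hlt0, l0, hl0, hlen0⟩ := hd
  match indent with
  | none => exact absurd rfl hne
  | some i =>
    have hi : i < 0 := by simpa using hlt0
    have hlen0' : (-i : Int) < l0.length := by simpa using hlen0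
    have hind : (match some i with
      | none => count_source_indent_port s.toList
      | some i => i) = i := rfl
    have hB : strip_source_indent_alt s (some i) = s := by
      unfold strip_source_indent_alt
      simp only [hind]
      rw [if_pos (by omega)]
    rw [hB]
    unfold strip_source_indent
    simp only [hind]
    rw [if_neg (by omega)]
    intro hEq
    have hX := congrArg (fun t => t.toList.length) hEq
    simp only [String.toList_ofList] at hX
    rw [PySem.List.foldl_append_singleton_eq_map, List.nil_append] at hX
    have htn : i.toNat = 0 := Int.toNat_of_nonpos hi.le
    have hmap : ∀ l ∈ PySem.Chars.splitOn s.toList ['\n'],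
        (if PySem.Chars.startswith l (List.replicate i.toNat ' ')
         then PySem.List.slice l (some i) none else l)
          = l.drop (l.length - (-i).toNat) := by
      intro l _hl
      have hsw : PySem.Chars.startswith l (List.replicate i.toNat ' ') = true := by
        rw [htn]
        simp [PySem.Chars.startswith]
      rw [if_pos hsw]
      have hknat : 0 < (-i).toNat := by omega
      have hk' : i = -(((-i).toNat : Nat) : Int) := by omega
      conv_lhs => rw [hk']
      rw [PySem.List.slice_from_neg_natCast l (-i).toNat hknat]
    rw [List.map_congr_left hmap] at hX
    have hjoin : (PySem.Chars.join ['\n'] (PySem.Chars.splitOn s.toList ['\n'])).length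
        = s.toList.length := by
      rw [splitOn_eq_splitNl, join_splitNl]
    have hstrict : (PySem.Chars.join ['\n']
        ((PySem.Chars.splitOn s.toList ['\n']).map (fun l => l.drop (l.length - (-i).toNat)))).length
        < (PySem.Chars.join ['\n'] (PySem.Chars.splitOn s.toList ['\n'])).length := by
      apply join_len_lt
      · intro l _hl
        simp only [List.length_drop]
        omega
      · refine ⟨l0, hl0, ?_⟩
        simp only [List.length_drop]
        omega
    omega
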